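-- pv_equiv track=rewrite | github.com/Wuyxin/Falcon | graphgym/graphgym/automl/space/grid.py | grid2list
-- ===== SOURCE A (Python) =====
-- def grid2list(grid):
--     list_in = [[]]
--     for grid_temp in grid:
--         list_out = []
--         for val in grid_temp:
--             for list_temp in list_in:
--                 list_out.append(list_temp + [val])
--         list_in = list_out
--     return list_in
-- ===== SOURCE B (Python) =====
-- def grid2list(grid):
--     lens = [len(g) for g in grid]
--     n = 1
--     for l in lens:
--         n *= l
--     result = []
--     for i in range(n):
--         row = []
--         k = i
--         for j in range(len(grid)):
--             l = lens[j]
--             row.append(grid[j][k % l])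
--             k //= l
--         result.append(row)
--     return result
-- ===== Notes on version B (the rewrite author's own statement) =====
-- stated objective: alternative
-- what changed: Replaces A's accumulator-growing nested loops (rebuilding the whole partial product per dimension) with direct mixed-radix index decoding: each output row is computed independently from its flat index i, with dimension 0 as the least-significant digit.
import Mathlib
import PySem

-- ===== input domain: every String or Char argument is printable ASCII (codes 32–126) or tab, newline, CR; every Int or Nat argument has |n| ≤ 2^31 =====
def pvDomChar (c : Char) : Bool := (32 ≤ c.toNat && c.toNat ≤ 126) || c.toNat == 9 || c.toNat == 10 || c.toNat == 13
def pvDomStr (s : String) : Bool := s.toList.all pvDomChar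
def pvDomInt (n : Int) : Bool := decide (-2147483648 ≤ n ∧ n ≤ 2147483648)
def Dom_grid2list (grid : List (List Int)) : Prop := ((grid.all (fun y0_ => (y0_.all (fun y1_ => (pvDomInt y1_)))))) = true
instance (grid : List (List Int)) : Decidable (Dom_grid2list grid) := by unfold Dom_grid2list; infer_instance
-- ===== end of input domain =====

-- B replaces A's accumulator-growing nested loops with mixed-radix decoding of a flat index;
-- objective: alternative (genuinely different algorithm, same asymptotic cost).

-- ===== PORT A =====
def grid2list (grid : List (List Int)) : List (List Int) :=
  grid.foldl (fun list_in grid_temp =>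
    grid_temp.foldl (fun list_out val =>
      list_in.foldl (fun lo list_temp => lo ++ [list_temp ++ [val]]) list_out) []) [[]]

-- ===== PORT B =====
-- inner-loop body of Source B: row.append(g[k % len(g)]); k //= len(g)
-- (the index k % len(g) is always in range when this body runs, so the .getD 0 default is never used;
--  k is a nonnegative Python int, modelled as Nat, whose %, // agree with Nat.mod, Nat.div)
def pvDStep (st : List Int × Nat) (g : List Int) : List Int × Nat :=
  (st.1 ++ [(PySem.List.pyGet? g ((st.2 % g.length : Nat) : Int)).getD 0], st.2 / g.length)

def grid2list_alt (grid : List (List Int)) : List (List Int) :=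
  let n := grid.foldl (fun a g => a * g.length) 1
  (List.range n).map (fun i => (grid.foldl pvDStep ([], i)).1)

-- ===== PRECONDITION & SPEC =====
def Spec_grid2list (grid : List (List Int)) (out : List (List Int)) : Prop := out = grid2list_alt grid
instance (grid : List (List Int)) (out : List (List Int)) : Decidable (Spec_grid2list grid out) := by unfold Spec_grid2list; infer_instance

-- ===== CLAIM (what is proved, stated in full; the proofs are below) =====
def Claim_equal_grid2list : Prop := ∀ (grid : List (List Int)), Dom_grid2list grid → Spec_grid2list grid (grid2list grid)

-- ===== LEMMAS AND PROOFS =====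

-- total number of rows: product of the dimension lengths (in A's / B's fold order)
def pvNprod (gs : List (List Int)) : Nat := gs.foldl (fun a g => a * g.length) 1

-- the row B decodes from flat index i
def pvRow (gs : List (List Int)) (i : Nat) : List Int := (gs.foldl pvDStep ([], i)).1

theorem pvNprod_foldl (gs : List (List Int)) : ∀ (a : Nat),
    gs.foldl (fun a g => a * g.length) a = a * pvNprod gs := by
  induction gs with
  | nil => intro a; simp [pvNprod]
  | cons g gs ih =>
      intro a
      simp only [pvNprod, List.foldl_cons] at *
      rw [ih, ih (1 * g.length)]
      ring

theorem pvRow_acc (gs : List (List Int)) : ∀ (acc : List Int) (k : Nat),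
    (gs.foldl pvDStep (acc, k)).1 = acc ++ (gs.foldl pvDStep ([], k)).1 := by
  induction gs with
  | nil => intro acc k; simp
  | cons g gs ih =>
      intro acc k
      simp only [List.foldl_cons, pvDStep, List.nil_append]
      rw [ih, ih [(PySem.List.pyGet? g ((k % g.length : Nat) : Int)).getD 0]]
      simp

theorem pvRow_cons (g : List Int) (gs : List (List Int)) (i : Nat) :
    pvRow (g :: gs) i
      = (PySem.List.pyGet? g ((i % g.length : Nat) : Int)).getD 0 :: pvRow gs (i / g.length) := by
  simp only [pvRow, List.foldl_cons, pvDStep, List.nil_append]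
  rw [pvRow_acc]
  simp

theorem pvRange_mul (a b : Nat) :
    List.range (a * b) = (List.range a).flatMap (fun j => (List.range b).map (fun q => j * b + q)) := by
  induction a with
  | zero => simp
  | succ a ih =>
      rw [Nat.succ_mul, List.range_add, ih, List.range_succ, List.flatMap_append]
      simp

theorem pvFlatMap_eq_range {β : Type} (g : List Int) (f : Int → List β) :
    g.flatMap f = (List.range g.length).flatMap (fun q => f (g.getD q 0)) := by
  induction g with
  | nil => simp
  | cons x g ih =>
      rw [List.flatMap_cons, List.length_cons, List.range_succ_eq_map, List.flatMap_cons,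
        List.flatMap_map, ih]
      simp

theorem pvFlatMapFlatMap {α β γ : Type} (l : List α) (f : α → List β) (g : β → List γ) :
    (l.flatMap f).flatMap g = l.flatMap (fun x => (f x).flatMap g) := by
  induction l <;> simp_all [List.flatMap_append]

theorem pvMapFlatMap {α β γ : Type} (l : List α) (f : α → List β) (g : β → γ) :
    (l.flatMap f).map g = l.flatMap (fun x => (f x).map g) := by
  induction l <;> simp_all

theorem pvFlatMapMap {α β γ : Type} (l : List α) (f : α → β) (g : β → List γ) :
    (l.map f).flatMap g = l.flatMap (fun x => g (f x)) := by
  induction l <;> simp_all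

theorem pvFlatMapSing {α β : Type} (l : List α) (f : α → β) :
    l.flatMap (fun x => [f x]) = l.map f := by
  induction l <;> simp_all

theorem pvFlatMapCongr {α β : Type} {l : List α} {f g : α → List β}
    (h : ∀ a ∈ l, f a = g a) : l.flatMap f = l.flatMap g := by
  induction l with
  | nil => rfl
  | cons x l ih =>
      simp only [List.flatMap_cons]
      rw [h x (by simp), ih (fun a ha => h a (by simp [ha]))]

-- the two inner loops of A build exactly the flatMap of the map
theorem pvStepA_eq (list_in : List (List Int)) (grid_temp : List Int) :
    grid_temp.foldl (fun list_out val =>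
        list_in.foldl (fun lo list_temp => lo ++ [list_temp ++ [val]]) list_out) []
      = grid_temp.flatMap (fun v => list_in.map (· ++ [v])) := by
  calc grid_temp.foldl (fun list_out val =>
          list_in.foldl (fun lo list_temp => lo ++ [list_temp ++ [val]]) list_out) []
      = grid_temp.foldl (fun list_out val => list_out ++ list_in.map (· ++ [val])) [] := by
        congr 1; funext list_out val; rw [PySem.List.foldl_append_singleton_eq_map]
    _ = [] ++ grid_temp.flatMap (fun v => list_in.map (· ++ [v])) := by
        rw [PySem.List.foldl_append_eq_flatMap]
    _ = _ := by simp

-- invariant of A's outer loop: the accumulator's rows get extended by B's decoded rows,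
-- flat index least-significant-first
theorem pvMain (gs : List (List Int)) : ∀ (acc : List (List Int)),
    gs.foldl (fun list_in grid_temp =>
        grid_temp.foldl (fun list_out val =>
          list_in.foldl (fun lo list_temp => lo ++ [list_temp ++ [val]]) list_out) []) acc
      = (List.range (pvNprod gs)).flatMap (fun i => acc.map (fun a => a ++ pvRow gs i)) := by
  induction gs with
  | nil =>
      intro acc
      simp [pvNprod, pvRow]
  | cons g gs ih =>
      intro acc
      have hN : pvNprod (g :: gs) = pvNprod gs * g.length := by
        have h := pvNprod_foldl gs (1 * g.length)
        simp only [pvNprod, List.foldl_cons] at *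
        rw [h]; ring
      rw [List.foldl_cons, ih, hN, pvRange_mul, pvFlatMapFlatMap]
      refine pvFlatMapCongr ?_
      intro j hj
      rw [pvStepA_eq, pvMapFlatMap, pvFlatMapMap]
      simp only [List.map_map]
      rw [pvFlatMap_eq_range g (fun v => acc.map ((· ++ pvRow gs j) ∘ (· ++ [v])))]
      refine pvFlatMapCongr ?_
      intro q hq
      simp only [List.mem_range] at hq
      have hmod : (j * g.length + q) % g.length = q := by
        rw [Nat.add_comm, Nat.add_mul_mod_self_right, Nat.mod_eq_of_lt hq]
      have hdiv : (j * g.length + q) / g.length = j := by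
        rw [Nat.mul_comm, Nat.mul_add_div (by omega : 0 < g.length), Nat.div_eq_of_lt hq]
        rfl
      rw [pvRow_cons, hmod, hdiv]
      have hget : (PySem.List.pyGet? g ((q : Nat) : Int)).getD 0 = g.getD q 0 := by
        rw [PySem.List.pyGet?_natCast]
        simp [List.getD_eq_getElem?_getD]
      rw [hget]
      exact List.map_congr_left (fun a _ => by simp)

-- ===== VERDICT (by name: the statement is the Claim_ definition above) =====
theorem grid2list_spec : Claim_equal_grid2list := by
  intro grid _
  show grid2list grid = grid2list_alt grid
  rw [grid2list, grid2list_alt]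
  rw [pvMain grid [[]]]
  simp only [List.map_cons, List.map_nil, List.nil_append]
  rw [pvFlatMapSing]
  rfl
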